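-- pv_equiv track=rewrite | github.com/j30206868/tagbasedmultispans_zh | src/nhelpers.py | clipped_passage_num
-- ===== SOURCE A (Python) =====
-- def clipped_passage_num(number_indices, number_len, numbers_in_passage, plen):
--     if not number_indices:
--         return number_indices, number_len, numbers_in_passage
--     if number_indices[-1] < plen:
--         return number_indices, number_len, numbers_in_passage
--     lo = 0
--     hi = len(number_indices) - 1
--     while lo < hi:
--         mid = (lo + hi) // 2
--         if number_indices[mid] < plen:
--             lo = mid + 1
--         else:
--             hi = mid
--     if number_indices[lo - 1] + number_len[lo - 1] > plen:
--         number_len[lo - 1] = plen - number_indices[lo - 1]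
--     return number_indices[:lo], number_len[:lo], numbers_in_passage[:lo]
-- ===== SOURCE B (Python) =====
-- def _cut(seg, base, plen):
--     # Binary search done as structural recursion on a shrinking list segment:
--     # returns base + the stop position of the lo/hi interval search inside seg.
--     if len(seg) <= 1:
--         return base
--     m = (len(seg) - 1) // 2
--     if seg[m] < plen:
--         return _cut(seg[m + 1:], base + m + 1, plen)
--     return _cut(seg[:m + 1], base, plen)
--
--
-- def clipped_passage_num(number_indices, number_len, numbers_in_passage, plen):
--     if not number_indices or number_indices[-1] < plen:
--         return number_indices, number_len, numbers_in_passage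
--     lo = _cut(number_indices, 0, plen)
--     if lo == 0:
--         return [], [], []
--     clipped = min(number_len[lo - 1], plen - number_indices[lo - 1])
--     return (number_indices[:lo],
--             number_len[:lo - 1] + [clipped],
--             numbers_in_passage[:lo])
-- ===== Notes on version B (the rewrite author's own statement) =====
-- stated objective: alternative
-- what changed: The in-place lo/hi index binary search with mutation of number_len and post-mutation slicing is replaced by a pure structural recursion on a shrinking list segment (carrying a base offset) plus a functional rebuild of the clipped prefix with min(); Pre_ excludes inputs where number_len is too short to guarantee the clip index exists (A raises IndexError on part of them, and the stated shape bound over-approximates that raising set since the exact set depends on the search outcome).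
-- outside the precondition, e.g. on clipped_passage_num([0, 1, 9], [5], [1, 2, 3], 1): A returns ([0], [1], [1]), B returns ([0], [1], [1])
import Mathlib
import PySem

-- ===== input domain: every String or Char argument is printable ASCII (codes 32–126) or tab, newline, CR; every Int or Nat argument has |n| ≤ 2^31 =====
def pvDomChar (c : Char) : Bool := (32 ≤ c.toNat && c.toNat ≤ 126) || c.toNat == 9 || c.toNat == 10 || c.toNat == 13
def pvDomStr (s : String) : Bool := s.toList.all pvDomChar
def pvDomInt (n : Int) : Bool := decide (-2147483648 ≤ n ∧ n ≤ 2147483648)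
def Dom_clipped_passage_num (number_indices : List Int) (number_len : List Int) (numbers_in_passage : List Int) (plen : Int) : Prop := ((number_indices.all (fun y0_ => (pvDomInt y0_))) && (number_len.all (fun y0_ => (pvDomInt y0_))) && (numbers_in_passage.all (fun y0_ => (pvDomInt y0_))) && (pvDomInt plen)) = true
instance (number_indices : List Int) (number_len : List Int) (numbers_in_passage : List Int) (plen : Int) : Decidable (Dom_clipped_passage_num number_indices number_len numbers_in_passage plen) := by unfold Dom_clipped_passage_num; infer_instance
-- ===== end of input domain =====

-- B replaces A's in-place lo/hi index binary search (which mutates number_len) by a pure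
-- recursion on a shrinking list segment plus a functional rebuild of the clipped prefix with min;
-- the equivalence proved is about the RETURN value only (A mutates number_len in place, B does not).

-- ===== PORT A =====
-- the 'while lo < hi' binary-search loop of A, step for step; the Nat argument is fuel that
-- only makes the recursion structural (the interval shrinks each step, so fuel = list length
-- is never exhausted at the call site below)
def pvALoop (a : List Int) (plen : Int) : Nat → Int → Int → Int
  | 0, lo, _ => lo
  | fuel + 1, lo, hi =>
    if lo < hi then
      let mid := PySem.Int.floordiv (lo + hi) 2
      if (PySem.List.pyGet? a mid).getD 0 < plen then pvALoop a plen fuel (mid + 1) hi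
      else pvALoop a plen fuel lo mid
    else lo

def clipped_passage_num (number_indices : List Int) (number_len : List Int) (numbers_in_passage : List Int) (plen : Int) : List Int × List Int × List Int :=
  if number_indices = [] then (number_indices, number_len, numbers_in_passage)
  else if (PySem.List.pyGet? number_indices (-1)).getD 0 < plen then
    (number_indices, number_len, numbers_in_passage)
  else
    let lo := pvALoop number_indices plen number_indices.length 0 ((number_indices.length : Int) - 1)
    let niv := (PySem.List.pyGet? number_indices (lo - 1)).getD 0
    let nlv := (PySem.List.pyGet? number_len (lo - 1)).getD 0
    -- if number_indices[lo-1] + number_len[lo-1] > plen: number_len[lo-1] = plen - number_indices[lo-1]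
    let number_len' := if niv + nlv > plen then PySem.List.pySetD number_len (lo - 1) (plen - niv) else number_len
    (PySem.List.slice number_indices none (some lo),
     PySem.List.slice number_len' none (some lo),
     PySem.List.slice numbers_in_passage none (some lo))

-- ===== PORT B =====
-- B's helper: the binary search as structural recursion on a shrinking segment with a base
-- offset; the Nat argument is fuel making the recursion structural (the segment shrinks each
-- step, so fuel = list length is never exhausted at the call site below)
def pvBCut (plen : Int) : Nat → List Int → Int → Int
  | 0, _, base => base
  | fuel + 1, seg, base =>
    if seg.length ≤ 1 then base
    else
      let m := (seg.length - 1) / 2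
      if seg.getD m 0 < plen then pvBCut plen fuel (seg.drop (m + 1)) (base + (m : Int) + 1)
      else pvBCut plen fuel (seg.take (m + 1)) base

def clipped_passage_num_alt (number_indices : List Int) (number_len : List Int) (numbers_in_passage : List Int) (plen : Int) : List Int × List Int × List Int :=
  if number_indices = [] ∨ (PySem.List.pyGet? number_indices (-1)).getD 0 < plen then
    (number_indices, number_len, numbers_in_passage)
  else
    let lo := pvBCut plen number_indices.length number_indices 0
    if lo = 0 then ([], [], [])
    else
      let clipped := min ((PySem.List.pyGet? number_len (lo - 1)).getD 0)
                         (plen - (PySem.List.pyGet? number_indices (lo - 1)).getD 0)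
      (PySem.List.slice number_indices none (some lo),
       PySem.List.slice number_len none (some (lo - 1)) ++ [clipped],
       PySem.List.slice numbers_in_passage none (some lo))

-- ===== PRECONDITION & SPEC =====
-- Pre_ excludes inputs where number_len is too short to guarantee that the clip index lo-1
-- exists in number_len: A raises IndexError on part of that region (and returns on the rest;
-- the stated shape bound over-approximates the raising set, which depends on the search outcome).
def Pre_clipped_passage_num (number_indices : List Int) (number_len : List Int) (numbers_in_passage : List Int) (plen : Int) : Prop :=
  number_indices = [] ∨ number_indices.getLastD 0 < plen ∨
    (number_len ≠ [] ∧ number_indices.length ≤ number_len.length + 1)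
instance (number_indices : List Int) (number_len : List Int) (numbers_in_passage : List Int) (plen : Int) : Decidable (Pre_clipped_passage_num number_indices number_len numbers_in_passage plen) := by unfold Pre_clipped_passage_num; infer_instance

def pvWitness_clipped_passage_num : List Int × List Int × List Int × Int := ([0, 5], [2, 9], [7, 8], 3)

def Spec_clipped_passage_num (number_indices : List Int) (number_len : List Int) (numbers_in_passage : List Int) (plen : Int) (out : List Int × List Int × List Int) : Prop := out = clipped_passage_num_alt number_indices number_len numbers_in_passage plen
instance (number_indices : List Int) (number_len : List Int) (numbers_in_passage : List Int) (plen : Int) (out : List Int × List Int × List Int) : Decidable (Spec_clipped_passage_num number_indices number_len numbers_in_passage plen out) := by unfold Spec_clipped_passage_num; infer_instance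

-- ===== CLAIM (what is proved, stated in full; the proofs are below) =====
def Claim_equal_clipped_passage_num : Prop := ∀ (number_indices : List Int) (number_len : List Int) (numbers_in_passage : List Int) (plen : Int), Dom_clipped_passage_num number_indices number_len numbers_in_passage plen → Pre_clipped_passage_num number_indices number_len numbers_in_passage plen → Spec_clipped_passage_num number_indices number_len numbers_in_passage plen (clipped_passage_num number_indices number_len numbers_in_passage plen)

-- ===== LEMMAS AND PROOFS =====

-- a one-point interval is returned unchanged by A's loop, whatever the fuel
lemma pvALoop_self (a : List Int) (plen : Int) (f : Nat) (lo : Int) :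
    pvALoop a plen f lo lo = lo := by
  cases f <;> simp [pvALoop]

-- a segment of length ≤ 1 is returned unchanged by B's recursion, whatever the fuel
lemma pvBCut_short (plen : Int) (f : Nat) (seg : List Int) (base : Int) (h : seg.length ≤ 1) :
    pvBCut plen f seg base = base := by
  cases f <;> simp [pvBCut, h]

-- B's segment recursion computes exactly the stop index of A's lo/hi loop
lemma pvBCut_eq_pvALoop (a : List Int) (plen : Int) :
    ∀ d lo hi f1 f2 : Nat, hi - lo ≤ d → hi - lo < f1 → hi - lo < f2 → lo ≤ hi → hi < a.length →
      pvBCut plen f1 ((a.drop lo).take (hi + 1 - lo)) (lo : Int)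
        = pvALoop a plen f2 (lo : Int) (hi : Int) := by
  intro d
  induction d with
  | zero =>
    intro lo hi f1 f2 hd hf1 hf2 hle hlt
    have heq : lo = hi := by omega
    subst heq
    rw [pvALoop_self, pvBCut_short]
    simp [List.length_take, List.length_drop]
  | succ d ih =>
    intro lo hi f1 f2 hd hf1 hf2 hle hlt
    by_cases heq : lo = hi
    · subst heq
      rw [pvALoop_self, pvBCut_short]
      simp [List.length_take, List.length_drop]
    · have hlohi : lo < hi := by omega
      obtain ⟨g1, rfl⟩ : ∃ g, f1 = g + 1 := ⟨f1 - 1, by omega⟩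
      obtain ⟨g2, rfl⟩ : ∃ g, f2 = g + 1 := ⟨f2 - 1, by omega⟩
      have hlen : ((a.drop lo).take (hi + 1 - lo)).length = hi + 1 - lo := by
        simp [List.length_take, List.length_drop]; omega
      have hnot1 : ¬ (hi + 1 - lo ≤ 1) := by omega
      have hlt' : (lo : Int) < (hi : Int) := by exact_mod_cast hlohi
      have hm : (hi + 1 - lo - 1) / 2 = (hi - lo) / 2 := by omega
      have hmnlt : lo + (hi - lo) / 2 < hi := by omega
      have hv : ((a.drop lo).take (hi + 1 - lo)).getD ((hi - lo) / 2) 0 = (a[(lo + hi) / 2]?).getD 0 := by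
        rw [List.getD_eq_getElem?_getD, List.getElem?_take_of_lt (by omega), List.getElem?_drop]
        congr 2
        omega
      have hcast : (lo : Int) + (hi : Int) = ((lo + hi : Nat) : Int) := by push_cast; ring
      have hmid : PySem.Int.floordiv ((lo : Int) + (hi : Int)) 2 = (((lo + hi) / 2 : Nat) : Int) := by
        rw [hcast]
        exact_mod_cast PySem.Int.floordiv_natCast (lo + hi) 2
      have hva : (PySem.List.pyGet? a (PySem.Int.floordiv ((lo : Int) + (hi : Int)) 2)).getD 0
          = (a[(lo + hi) / 2]?).getD 0 := by
        rw [hmid, PySem.List.pyGet?_natCast]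
      rw [pvBCut, pvALoop]
      simp only [hlen]
      rw [if_neg hnot1, if_pos hlt', hm, hv, hva]
      by_cases hc : (a[(lo + hi) / 2]?).getD 0 < plen
      · rw [if_pos hc, if_pos hc]
        have hdrop : ((a.drop lo).take (hi + 1 - lo)).drop ((hi - lo) / 2 + 1)
            = (a.drop (lo + (hi - lo) / 2 + 1)).take (hi + 1 - (lo + (hi - lo) / 2 + 1)) := by
          rw [List.drop_take, List.drop_drop]
          congr 1 <;> omega
        have hbase : (lo : Int) + (((hi - lo) / 2 : Nat) : Int) + 1 = ((lo + (hi - lo) / 2 + 1 : Nat) : Int) := by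
          push_cast; ring
        have hmid1 : PySem.Int.floordiv ((lo : Int) + (hi : Int)) 2 + 1 = ((lo + (hi - lo) / 2 + 1 : Nat) : Int) := by
          rw [hmid]; push_cast; omega
        rw [hdrop, hbase, hmid1]
        exact ih (lo + (hi - lo) / 2 + 1) hi g1 g2 (by omega) (by omega) (by omega) (by omega) hlt
      · rw [if_neg hc, if_neg hc]
        have htake : ((a.drop lo).take (hi + 1 - lo)).take ((hi - lo) / 2 + 1)
            = (a.drop lo).take ((lo + (hi - lo) / 2) + 1 - lo) := by
          rw [List.take_take]
          congr 1
          omega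
        have hmid2 : PySem.Int.floordiv ((lo : Int) + (hi : Int)) 2 = ((lo + (hi - lo) / 2 : Nat) : Int) := by
          rw [hmid]; push_cast; omega
        rw [htake, hmid2]
        exact ih lo (lo + (hi - lo) / 2) g1 g2 (by omega) (by omega) (by omega) (by omega) (by omega)

-- the loop's result stays inside [lo, hi], whatever the fuel
lemma pvALoop_bounds (a : List Int) (plen : Int) :
    ∀ f : Nat, ∀ lo hi : Int, lo ≤ hi →
      lo ≤ pvALoop a plen f lo hi ∧ pvALoop a plen f lo hi ≤ hi := by
  intro f
  induction f with
  | zero =>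
    intro lo hi hle
    simp [pvALoop]
    omega
  | succ f ih =>
    intro lo hi hle
    rw [pvALoop]
    by_cases h : lo < hi
    · simp only [h, if_pos]
      have hmid := PySem.Int.floordiv_two_mid_bounds (le_of_lt h)
      have h2 : PySem.Int.floordiv (lo + hi) 2 < hi := by
        rw [PySem.Int.floordiv_lt_iff_lt_mul (by norm_num)]; omega
      split
      · have := ih (PySem.Int.floordiv (lo + hi) 2 + 1) hi (by omega)
        omega
      · have := ih lo (PySem.Int.floordiv (lo + hi) 2) (by omega)
        omega
    · simp only [h, if_neg, not_false_iff]
      omega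

-- taking one past a set index splits off the written value
lemma take_succ_set (l : List Int) (j : Nat) (v : Int) (h : j < l.length) :
    (l.set j v).take (j + 1) = l.take j ++ [v] := by
  rw [List.set_eq_take_append_cons_drop, if_pos h, List.take_append]
  simp [List.length_take, Nat.min_eq_left (le_of_lt h)]

-- taking one more element splits off the element at j
lemma take_succ_elem (l : List Int) (j : Nat) (h : j < l.length) :
    l.take (j + 1) = l.take j ++ [l[j]] := by
  rw [List.take_add_one]
  simp [List.getElem?_eq_getElem h]

-- ===== VERDICT (by name: the statement is the Claim_ definition above) =====
theorem clipped_passage_num_spec : Claim_equal_clipped_passage_num := by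
  intro ni nl nip plen hdom hpre
  unfold Spec_clipped_passage_num
  by_cases h0 : ni = []
  · simp [clipped_passage_num, clipped_passage_num_alt, h0]
  by_cases h1 : (PySem.List.pyGet? ni (-1)).getD 0 < plen
  · simp [clipped_passage_num, clipped_passage_num_alt, h0, h1]
  have hn : 1 ≤ ni.length := List.length_pos_of_ne_nil h0
  have hshape : nl ≠ [] ∧ ni.length ≤ nl.length + 1 := by
    rcases hpre with h | h | h
    · exact absurd h h0
    · exfalso
      apply h1
      rw [PySem.List.pyGet?_neg_one]
      simpa [List.getLastD_eq_getLast?] using h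
    · exact h
  have hnl : 1 ≤ nl.length := List.length_pos_of_ne_nil hshape.1
  have hcut := pvBCut_eq_pvALoop ni plen (ni.length - 1) 0 (ni.length - 1)
    ni.length ni.length (by omega) (by omega) (by omega) (by omega) (by omega)
  have he1 : ni.length - 1 + 1 - 0 = ni.length := by omega
  rw [he1, List.drop_zero, List.take_length] at hcut
  have he2 : ((ni.length - 1 : Nat) : Int) = (ni.length : Int) - 1 := by omega
  rw [he2] at hcut
  simp only [Nat.cast_zero] at hcut
  have hb := pvALoop_bounds ni plen ni.length 0 ((ni.length : Int) - 1) (by omega)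
  simp only [clipped_passage_num, clipped_passage_num_alt, if_neg h0, if_neg h1]
  have horB : ¬ (ni = [] ∨ (PySem.List.pyGet? ni (-1)).getD 0 < plen) := by tauto
  rw [if_neg horB, hcut]
  set LO := pvALoop ni plen ni.length 0 ((ni.length : Int) - 1) with hLOdef
  by_cases hz : LO = 0
  · rw [if_pos hz, hz]
    rw [PySem.List.slice_to ni (le_refl 0), PySem.List.slice_to _ (le_refl 0), PySem.List.slice_to nip (le_refl 0)]
    simp
  · rw [if_neg hz]
    have hLO1 : 1 ≤ LO := by omega
    have hjni : LO - 1 < (ni.length : Int) := by omega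
    have hjnl : LO - 1 < (nl.length : Int) := by
      have := hshape.2; omega
    have hj1 : (LO - 1).toNat < ni.length := by omega
    have hj2 : (LO - 1).toNat < nl.length := by omega
    have hget_ni : PySem.List.pyGet? ni (LO - 1) = some ni[(LO - 1).toNat] :=
      PySem.List.pyGet?_eq_some_getElem ni (by omega) hjni
    have hget_nl : PySem.List.pyGet? nl (LO - 1) = some nl[(LO - 1).toNat] :=
      PySem.List.pyGet?_eq_some_getElem nl (by omega) hjnl
    rw [hget_ni, hget_nl]
    simp only [Option.getD_some]
    have htn : LO.toNat = (LO - 1).toNat + 1 := by omega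
    rw [PySem.List.slice_to ni (by omega : (0:Int) ≤ LO), PySem.List.slice_to _ (by omega : (0:Int) ≤ LO),
        PySem.List.slice_to nip (by omega : (0:Int) ≤ LO), PySem.List.slice_to nl (by omega : (0:Int) ≤ LO - 1)]
    refine Prod.ext rfl (Prod.ext ?_ rfl)
    simp only
    by_cases hcond : ni[(LO - 1).toNat] + nl[(LO - 1).toNat] > plen
    · rw [if_pos hcond, PySem.List.pySetD_of_nonneg nl _ (by omega : (0:Int) ≤ LO - 1), htn,
          take_succ_set nl _ _ hj2,
          min_eq_right (by omega : plen - ni[(LO - 1).toNat] ≤ nl[(LO - 1).toNat])]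
    · rw [if_neg hcond, htn, take_succ_elem nl _ hj2,
          min_eq_left (by omega : nl[(LO - 1).toNat] ≤ plen - ni[(LO - 1).toNat])]
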